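-- pv_equiv track=rewrite | github.com/Ravindra32035/algosolutions_girus | project/algorithms/knights_portals.py | _create_visualization
-- ===== SOURCE A (Python) =====
-- def _create_visualization(grid, path):
--     """Create visualization of the path on the grid"""
--     if not path:
--         return []
--
--     rows, cols = len(grid), len(grid[0])
--     viz = [['.' if grid[i][j] == 0 else '#' for j in range(cols)] for i in range(rows)]
--
--     # Mark path
--     for i, (row, col) in enumerate(path):
--         if i == 0:
--             viz[row][col] = 'S'  # Start
--         elif i == len(path) - 1:
--             viz[row][col] = 'E'  # End
--         else:
--             viz[row][col] = str(i % 10)  # Path step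
--
--     return [''.join(row) for row in viz]
-- ===== SOURCE B (Python) =====
-- def _create_visualization(grid, path):
--     """Create visualization of the path on the grid (marks placed back-to-front, base filled at render)."""
--     if not path:
--         return []
--
--     rows, cols = len(grid), len(grid[0])
--     viz = [[None] * cols for _ in range(rows)]
--
--     # Walk the path backwards; the first mark to claim a cell is the one that
--     # would have been written last, so earlier (forward) writes are skipped.
--     last = len(path) - 1
--     for i in range(last, -1, -1):
--         row, col = path[i]
--         if viz[row][col] is None:
--             viz[row][col] = 'S' if i == 0 else 'E' if i == last else str(i % 10)
--
--     return [''.join(ch if ch is not None else ('.' if grid[i][j] == 0 else '#')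
--                     for j, ch in enumerate(row))
--             for i, row in enumerate(viz)]
-- ===== Notes on version B (the rewrite author's own statement) =====
-- stated objective: alternative
-- what changed: B walks the path backwards with a write-once (skip if already claimed) rule onto a blank placeholder grid and fills base characters only at render time, instead of A's forward overwrite loop over a pre-rendered mutable character grid; Pre_ excludes only the inputs where A raises IndexError (empty or ragged grid with a nonempty path, or a path coordinate outside Python's index range).
import Mathlib
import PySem

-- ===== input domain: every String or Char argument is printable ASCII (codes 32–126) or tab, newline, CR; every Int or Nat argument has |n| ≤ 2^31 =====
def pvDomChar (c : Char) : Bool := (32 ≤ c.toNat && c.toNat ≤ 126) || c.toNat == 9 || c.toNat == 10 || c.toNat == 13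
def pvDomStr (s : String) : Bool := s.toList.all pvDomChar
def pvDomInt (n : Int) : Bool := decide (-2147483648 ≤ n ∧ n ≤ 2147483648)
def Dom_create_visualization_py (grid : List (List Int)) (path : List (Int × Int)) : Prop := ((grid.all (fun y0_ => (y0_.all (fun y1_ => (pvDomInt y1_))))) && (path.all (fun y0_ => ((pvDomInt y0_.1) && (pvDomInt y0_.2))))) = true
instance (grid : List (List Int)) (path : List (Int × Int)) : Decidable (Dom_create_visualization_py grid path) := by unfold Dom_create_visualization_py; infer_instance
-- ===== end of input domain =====

-- B marks the path back-to-front with a write-once rule on a blank placeholder grid and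
-- fills the base characters at render time, instead of A's forward overwrite loop over a
-- pre-rendered mutable character grid (objective: alternative, same cost).

-- ===== PORT A =====
def create_visualization_py (grid : List (List Int)) (path : List (Int × Int)) : List String :=
  if path = [] then []
  else
    let rows : Int := grid.length
    let cols : Int := (PySem.List.pyGetD grid 0 ([] : List Int)).length
    let viz : List (List String) :=
      (PySem.List.pyRange 0 rows 1).map (fun i =>
        (PySem.List.pyRange 0 cols 1).map (fun j =>
          if PySem.List.pyGetD (PySem.List.pyGetD grid i []) j 0 = 0 then "." else "#"))
    let viz :=
      (PySem.List.enumerate path 0).foldl (fun viz p =>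
        PySem.List.pySetD viz p.2.1
          (PySem.List.pySetD (PySem.List.pyGetD viz p.2.1 []) p.2.2
            (if p.1 = 0 then "S"
             else if p.1 = (path.length : Int) - 1 then "E"
             else PySem.Int.toStr (PySem.Int.mod p.1 10)))) viz
    viz.map (fun row => PySem.Str.join "" row)

-- ===== PORT B =====
def create_visualization_py_alt (grid : List (List Int)) (path : List (Int × Int)) : List String :=
  if path = [] then []
  else
    let rows : Int := grid.length
    let cols : Int := (PySem.List.pyGetD grid 0 ([] : List Int)).length
    let viz : List (List (Option String)) :=
      (PySem.List.pyRange 0 rows 1).map (fun _ => List.replicate cols.toNat none)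
    let last : Int := (path.length : Int) - 1
    let viz :=
      (PySem.List.pyRange last (-1) (-1)).foldl (fun viz i =>
        let p := PySem.List.pyGetD path i (0, 0)
        if PySem.List.pyGetD (PySem.List.pyGetD viz p.1 []) p.2 none = none then
          PySem.List.pySetD viz p.1
            (PySem.List.pySetD (PySem.List.pyGetD viz p.1 []) p.2
              (some (if i = 0 then "S"
                     else if i = last then "E"
                     else PySem.Int.toStr (PySem.Int.mod i 10))))
        else viz) viz
    (PySem.List.enumerate viz 0).map (fun q =>
      PySem.Str.join "" ((PySem.List.enumerate q.2 0).map (fun c =>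
        c.2.getD (if PySem.List.pyGetD (PySem.List.pyGetD grid q.1 []) c.1 0 = 0 then "." else "#"))))

-- ===== PRECONDITION & SPEC =====
-- Pre_ excludes exactly the inputs where A raises an IndexError: a nonempty path with an
-- empty grid, a grid row shorter than len(grid[0]), or a path coordinate outside Python's
-- negative-index range for the grid.
def Pre_create_visualization_py (grid : List (List Int)) (path : List (Int × Int)) : Prop :=
  path = [] ∨
    (grid ≠ [] ∧
     (∀ row ∈ grid, (grid.headD []).length ≤ row.length) ∧
     (∀ p ∈ path,
        -(grid.length : Int) ≤ p.1 ∧ p.1 < (grid.length : Int) ∧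
        -((grid.headD []).length : Int) ≤ p.2 ∧ p.2 < ((grid.headD []).length : Int)))
instance (grid : List (List Int)) (path : List (Int × Int)) : Decidable (Pre_create_visualization_py grid path) := by unfold Pre_create_visualization_py; infer_instance
def pvWitness_create_visualization_py : List (List Int) × (List (Int × Int)) :=
  ([[0, 1], [1, 0]], [(0, 0), (1, 1)])
def Spec_create_visualization_py (grid : List (List Int)) (path : List (Int × Int)) (out : List String) : Prop := out = create_visualization_py_alt grid path
instance (grid : List (List Int)) (path : List (Int × Int)) (out : List String) : Decidable (Spec_create_visualization_py grid path out) := by unfold Spec_create_visualization_py; infer_instance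

-- ===== CLAIM (what is proved, stated in full; the proofs are below) =====
def Claim_equal_create_visualization_py : Prop := ∀ (grid : List (List Int)) (path : List (Int × Int)), Dom_create_visualization_py grid path → Pre_create_visualization_py grid path → Spec_create_visualization_py grid path (create_visualization_py grid path)

-- ===== LEMMAS AND PROOFS =====

theorem pvEmod_of_nonneg (r n : Int) (h : 0 ≤ r) (h2 : r < n) : r % n = r :=
  Int.emod_eq_of_lt h h2
theorem pvEmod_of_neg (r n : Int) (h : r < 0) (h2 : -n ≤ r) : r % n = r + n := by
  have := Int.add_emod_right r n
  rw [← this, Int.emod_eq_of_lt (by omega) (by omega)]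

theorem pvSetD_mod {α : Type} (xs : List α) (r : Int) (v : α)
    (h1 : -(xs.length : Int) ≤ r) (h2 : r < (xs.length : Int)) :
    PySem.List.pySetD xs r v = xs.set (PySem.Int.mod r (xs.length : Int)).toNat v := by
  have hpos : 0 < (xs.length : Int) := by omega
  rw [PySem.Int.mod_eq_emod_of_pos hpos]
  simp [PySem.List.pySetD, PySem.List.pySet?, PySem.List.pyIdx?]
  split_ifs with h
  · rw [pvEmod_of_nonneg _ _ h h2]; rfl
  · rw [pvEmod_of_neg _ _ (by omega) h1]
    have : (r + (xs.length : Int)).toNat = xs.length - (-r).toNat := by omega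
    rw [this]; rfl

theorem pvGetD_mod {α : Type} (xs : List α) (r : Int) (v : α)
    (h1 : -(xs.length : Int) ≤ r) (h2 : r < (xs.length : Int)) :
    PySem.List.pyGetD xs r v = xs.getD (PySem.Int.mod r (xs.length : Int)).toNat v := by
  have hpos : 0 < (xs.length : Int) := by omega
  rw [PySem.Int.mod_eq_emod_of_pos hpos]
  simp [PySem.List.pyGetD, PySem.List.pyGet?, PySem.List.pyIdx?, List.getD_eq_getElem?_getD]
  split_ifs with h
  · rw [pvEmod_of_nonneg _ _ h h2]; rfl
  · rw [pvEmod_of_neg _ _ (by omega) h1]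
    have : (r + (xs.length : Int)).toNat = xs.length - (-r).toNat := by omega
    rw [this]; rfl

-- wrapped (Python-normalized) index
def pvWrap (len : Nat) (x : Int) : Nat := (PySem.Int.mod x (len : Int)).toNat

-- a path entry (index, (row, col)) lands on cell (k, j) of an n×m grid
def pvHit (n m k j : Nat) (p : Int × Int × Int) : Bool :=
  pvWrap n p.2.1 == k && pvWrap m p.2.2 == j

-- dimensions of a 2D list
def pvDims {α : Type} (n m : Nat) (viz : List (List α)) : Prop :=
  viz.length = n ∧ ∀ row ∈ viz, row.length = m

-- cell access with defaults
def pvCell {α : Type} (d : α) (viz : List (List α)) (k j : Nat) : α :=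
  (viz.getD k []).getD j d

-- the in-bounds (after wrapping) hypothesis on a path entry
def pvOk (n m : Nat) (r c : Int) : Prop :=
  -(n : Int) ≤ r ∧ r < (n : Int) ∧ -(m : Int) ≤ c ∧ c < (m : Int)

theorem pvWrap_lt (len : Nat) (x : Int) (h : 0 < len) : pvWrap len x < len := by
  have := PySem.Int.mod_lt x (b := (len : Int)) (by omega)
  have := PySem.Int.mod_nonneg x (b := (len : Int)) (by omega)
  unfold pvWrap; omega

-- one combined write viz[r][c] = v (both indices wrapped) in List.set form
theorem pvSet2_eq {α : Type} (n m : Nat) (viz : List (List α)) (r c : Int) (v : α)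
    (hd : pvDims n m viz) (hok : pvOk n m r c) (hn : 0 < n) :
    PySem.List.pySetD viz r (PySem.List.pySetD (PySem.List.pyGetD viz r []) c v)
      = viz.set (pvWrap n r) ((viz.getD (pvWrap n r) []).set (pvWrap m c) v) := by
  obtain ⟨hlen, hrows⟩ := hd
  obtain ⟨h1, h2, h3, h4⟩ := hok
  have hwr := pvWrap_lt n r hn
  have e1 : PySem.List.pyGetD viz r [] = viz.getD (pvWrap n r) [] := by
    rw [pvGetD_mod _ _ _ (by rw [hlen]; omega) (by rw [hlen]; omega)]
    simp only [pvWrap, hlen]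
  have hrowlen : (viz.getD (pvWrap n r) []).length = m := by
    rw [List.getD_eq_getElem _ _ (by omega)]
    exact hrows _ (List.getElem_mem _)
  rw [e1, pvSetD_mod viz r _ (by rw [hlen]; omega) (by rw [hlen]; omega),
      pvSetD_mod _ c _ (by rw [hrowlen]; omega) (by rw [hrowlen]; omega)]
  simp only [pvWrap] at hrowlen ⊢
  simp only [hlen, hrowlen]

theorem pvSet2_dims {α : Type} (n m : Nat) (viz : List (List α)) (r c : Int) (v : α)
    (hd : pvDims n m viz) (hok : pvOk n m r c) (hn : 0 < n) :
    pvDims n m (PySem.List.pySetD viz r (PySem.List.pySetD (PySem.List.pyGetD viz r []) c v)) := by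
  rw [pvSet2_eq n m viz r c v hd hok hn]
  obtain ⟨hlen, hrows⟩ := hd
  have hwr := pvWrap_lt n r hn
  have hrowlen : (viz.getD (pvWrap n r) []).length = m := by
    rw [List.getD_eq_getElem _ _ (by omega)]
    exact hrows _ (List.getElem_mem _)
  refine ⟨by simp [hlen], ?_⟩
  intro row hmem
  rcases List.mem_or_eq_of_mem_set hmem with h | h
  · exact hrows _ h
  · rw [h, List.length_set]; exact hrowlen

theorem pvCell_eq {α : Type} (d : α) (n m : Nat) (viz : List (List α))
    (hd : pvDims n m viz) (k j : Nat) (hk : k < n) :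
    pvCell d viz k j = (viz[k]'(by rw [hd.1]; exact hk)).getD j d := by
  unfold pvCell
  rw [List.getD_eq_getElem viz [] (n := k) (by rw [hd.1]; exact hk)]

theorem pvSet2_cell {α : Type} (n m : Nat) (viz : List (List α)) (d : α) (r c : Int) (v : α)
    (hd : pvDims n m viz) (hok : pvOk n m r c) (k j : Nat) (hk : k < n) (hj : j < m) :
    pvCell d (PySem.List.pySetD viz r (PySem.List.pySetD (PySem.List.pyGetD viz r []) c v)) k j
      = if pvWrap n r = k ∧ pvWrap m c = j then v else pvCell d viz k j := by
  have hn : 0 < n := by omega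
  have hm : 0 < m := by omega
  rw [pvSet2_eq n m viz r c v hd hok hn]
  obtain ⟨hlen, hrows⟩ := hd
  have hwr := pvWrap_lt n r hn
  have hrowlen : (viz.getD (pvWrap n r) []).length = m := by
    rw [List.getD_eq_getElem _ _ (by omega)]
    exact hrows _ (List.getElem_mem _)
  unfold pvCell
  rw [List.getD_eq_getElem
        (viz.set (pvWrap n r) ((viz.getD (pvWrap n r) []).set (pvWrap m c) v)) [] (n := k)
        (by rw [List.length_set, hlen]; omega),
      List.getElem_set]
  by_cases hkr : pvWrap n r = k
  · rw [if_pos hkr,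
        List.getD_eq_getElem ((viz.getD (pvWrap n r) []).set (pvWrap m c) v) d (n := j)
          (by rw [List.length_set, hrowlen]; omega),
        List.getElem_set]
    by_cases hjc : pvWrap m c = j
    · rw [if_pos hjc, if_pos ⟨hkr, hjc⟩]
    · rw [if_neg hjc, if_neg (fun hh => hjc hh.2), ← hkr,
          List.getD_eq_getElem (viz.getD (pvWrap n r) []) d (n := j) (by rw [hrowlen]; omega)]
  · rw [if_neg hkr, if_neg (fun hh => hkr hh.1),
        List.getD_eq_getElem viz [] (n := k) (by rw [hlen]; omega)]

-- A's forward overwrite loop, cellwise: the LAST hit wins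
theorem pvFoldA (n m : Nat) (lab : Int → String) (l : List (Int × Int × Int))
    (V : List (List String)) (hd : pvDims n m V) (hb : ∀ p ∈ l, pvOk n m p.2.1 p.2.2)
    (hn : 0 < n) :
    pvDims n m (l.foldl (fun viz p =>
        PySem.List.pySetD viz p.2.1
          (PySem.List.pySetD (PySem.List.pyGetD viz p.2.1 []) p.2.2 (lab p.1))) V) ∧
    ∀ k j, k < n → j < m →
      pvCell "" (l.foldl (fun viz p =>
        PySem.List.pySetD viz p.2.1
          (PySem.List.pySetD (PySem.List.pyGetD viz p.2.1 []) p.2.2 (lab p.1))) V) k j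
        = match l.reverse.find? (pvHit n m k j) with
          | some p => lab p.1
          | none => pvCell "" V k j := by
  induction l generalizing V with
  | nil => exact ⟨hd, fun k j _ _ => rfl⟩
  | cons p l ih =>
    have hokp := hb p (List.mem_cons_self ..)
    have hd' := pvSet2_dims n m V p.2.1 p.2.2 (lab p.1) hd hokp hn
    obtain ⟨ihd, ihc⟩ := ih _ hd' (fun q hq => hb q (List.mem_cons_of_mem _ hq))
    refine ⟨ihd, fun k j hk hj => ?_⟩
    rw [List.foldl_cons, ihc k j hk hj]
    rw [List.reverse_cons, List.find?_append]
    cases hfind : l.reverse.find? (pvHit n m k j) with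
    | some q => simp
    | none =>
      simp only [Option.none_or]
      rw [pvSet2_cell n m V "" p.2.1 p.2.2 (lab p.1) hd hokp k j hk hj]
      by_cases hhit : pvHit n m k j p = true
      · have : pvWrap n p.2.1 = k ∧ pvWrap m p.2.2 = j := by
          simpa [pvHit] using hhit
        simp [List.find?, hhit, this]
      · have : ¬(pvWrap n p.2.1 = k ∧ pvWrap m p.2.2 = j) := by
          simpa [pvHit] using hhit
        simp only [List.find?, hhit]
        rw [if_neg this]

-- B's backward write-once loop, cellwise: the FIRST hit (in processing order) wins,
-- and an already-claimed cell is never touched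
theorem pvFoldB (n m : Nat) (lab : Int → String) (l : List (Int × Int × Int))
    (W : List (List (Option String))) (hd : pvDims n m W) (hb : ∀ p ∈ l, pvOk n m p.2.1 p.2.2)
    (hn : 0 < n) (hm : 0 < m) :
    pvDims n m (l.foldl (fun viz p =>
        if PySem.List.pyGetD (PySem.List.pyGetD viz p.2.1 []) p.2.2 none = none then
          PySem.List.pySetD viz p.2.1
            (PySem.List.pySetD (PySem.List.pyGetD viz p.2.1 []) p.2.2 (some (lab p.1)))
        else viz) W) ∧
    ∀ k j, k < n → j < m →
      pvCell none (l.foldl (fun viz p =>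
        if PySem.List.pyGetD (PySem.List.pyGetD viz p.2.1 []) p.2.2 none = none then
          PySem.List.pySetD viz p.2.1
            (PySem.List.pySetD (PySem.List.pyGetD viz p.2.1 []) p.2.2 (some (lab p.1)))
        else viz) W) k j
        = (pvCell none W k j).or ((l.find? (pvHit n m k j)).map (fun p => lab p.1)) := by
  induction l generalizing W with
  | nil => exact ⟨hd, fun k j _ _ => by simp⟩
  | cons p l ih =>
    have hokp := hb p (List.mem_cons_self ..)
    obtain ⟨h1, h2, h3, h4⟩ := hokp
    obtain ⟨hlen, hrows⟩ := hd
    have hwr : pvWrap n p.2.1 < n := pvWrap_lt n _ hn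
    have hwc : pvWrap m p.2.2 < m := pvWrap_lt m _ hm
    -- the guard reads exactly cell (pvWrap n p.2.1, pvWrap m p.2.2)
    have hrow : PySem.List.pyGetD W p.2.1 [] = W.getD (pvWrap n p.2.1) [] := by
      rw [pvGetD_mod _ _ _ (by omega : -(W.length : Int) ≤ p.2.1) (by omega)]
      simp [hlen, pvWrap]
    have hrowmem : W.getD (pvWrap n p.2.1) [] ∈ W := (by rw [List.getD_eq_getElem _ _ (by omega)]; exact List.getElem_mem _)
    have hrowlen : (W.getD (pvWrap n p.2.1) []).length = m := hrows _ hrowmem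
    have hguard : PySem.List.pyGetD (PySem.List.pyGetD W p.2.1 []) p.2.2 none
        = pvCell none W (pvWrap n p.2.1) (pvWrap m p.2.2) := by
      rw [hrow, pvGetD_mod _ _ _ (by rw [hrowlen]; omega) (by rw [hrowlen]; omega)]
      unfold pvCell
      simp only [pvWrap] at hrowlen ⊢
      simp only [hrowlen]
    simp only [List.foldl_cons]
    by_cases hg : PySem.List.pyGetD (PySem.List.pyGetD W p.2.1 []) p.2.2 none = none
    · -- cell free: write
      rw [if_pos hg]
      have hd' := pvSet2_dims n m W p.2.1 p.2.2 (some (lab p.1)) ⟨hlen, hrows⟩ ⟨h1, h2, h3, h4⟩ hn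
      obtain ⟨ihd, ihc⟩ := ih _ hd' (fun q hq => hb q (List.mem_cons_of_mem _ hq))
      refine ⟨ihd, fun k j hk hj => ?_⟩
      rw [ihc k j hk hj,
          pvSet2_cell n m W none p.2.1 p.2.2 (some (lab p.1)) ⟨hlen, hrows⟩ ⟨h1, h2, h3, h4⟩ k j hk hj]
      by_cases hhit : pvHit n m k j p = true
      · have he : pvWrap n p.2.1 = k ∧ pvWrap m p.2.2 = j := by simpa [pvHit] using hhit
        rw [if_pos he, List.find?_cons_of_pos hhit]
        rw [hguard, he.1, he.2] at hg
        simp [hg]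
      · have he : ¬(pvWrap n p.2.1 = k ∧ pvWrap m p.2.2 = j) := by simpa [pvHit] using hhit
        rw [if_neg he, List.find?_cons_of_neg (by simpa using hhit)]
    · -- cell already claimed: skip; a later hit on it changes nothing
      rw [if_neg hg]
      obtain ⟨ihd, ihc⟩ := ih _ ⟨hlen, hrows⟩ (fun q hq => hb q (List.mem_cons_of_mem _ hq))
      refine ⟨ihd, fun k j hk hj => ?_⟩
      rw [ihc k j hk hj]
      by_cases hhit : pvHit n m k j p = true
      · have he : pvWrap n p.2.1 = k ∧ pvWrap m p.2.2 = j := by simpa [pvHit] using hhit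
        rw [List.find?_cons_of_pos hhit]
        rw [hguard, he.1, he.2] at hg
        cases hcell : pvCell none W k j with
        | none => exact absurd hcell hg
        | some v => simp
      · rw [List.find?_cons_of_neg (by simpa using hhit)]

theorem pvHead_eq (grid : List (List Int)) :
    PySem.List.pyGetD grid 0 ([] : List Int) = grid.headD [] := by
  cases grid <;> simp [PySem.List.pyGetD_zero]

-- dimensions and cells of A's base grid
theorem pvBaseA (grid : List (List Int)) :
    pvDims grid.length (PySem.List.pyGetD grid 0 ([] : List Int)).length
      ((PySem.List.pyRange 0 (grid.length : Int) 1).map (fun i =>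
        (PySem.List.pyRange 0 ((PySem.List.pyGetD grid 0 ([] : List Int)).length : Int) 1).map (fun j =>
          if PySem.List.pyGetD (PySem.List.pyGetD grid i []) j 0 = 0 then "." else "#"))) ∧
    ∀ k j, k < grid.length → j < (PySem.List.pyGetD grid 0 ([] : List Int)).length →
      pvCell "" ((PySem.List.pyRange 0 (grid.length : Int) 1).map (fun i =>
        (PySem.List.pyRange 0 ((PySem.List.pyGetD grid 0 ([] : List Int)).length : Int) 1).map (fun j =>
          if PySem.List.pyGetD (PySem.List.pyGetD grid i []) j 0 = 0 then "." else "#"))) k j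
        = if PySem.List.pyGetD (PySem.List.pyGetD grid (k : Int) []) (j : Int) 0 = 0 then "." else "#" := by
  have hdims : pvDims grid.length (PySem.List.pyGetD grid 0 ([] : List Int)).length
      ((PySem.List.pyRange 0 (grid.length : Int) 1).map (fun i =>
        (PySem.List.pyRange 0 ((PySem.List.pyGetD grid 0 ([] : List Int)).length : Int) 1).map (fun j =>
          if PySem.List.pyGetD (PySem.List.pyGetD grid i []) j 0 = 0 then "." else "#"))) := by
    refine ⟨by simp [PySem.List.length_pyRange_one], ?_⟩
    intro row hmem
    obtain ⟨i, _, hrow⟩ := List.mem_map.mp hmem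
    rw [← hrow]; simp [PySem.List.length_pyRange_one]
  refine ⟨hdims, ?_⟩
  intro k j hk hj
  rw [pvCell_eq "" _ _ _ hdims k j hk, List.getElem_map, PySem.List.getElem_pyRange_one,
      List.getD_eq_getElem _ "" (n := j) (by simp [PySem.List.length_pyRange_one]; omega),
      List.getElem_map, PySem.List.getElem_pyRange_one]
  simp

-- dimensions and cells of B's blank grid
theorem pvBaseB (grid : List (List Int)) :
    pvDims grid.length (PySem.List.pyGetD grid 0 ([] : List Int)).length
      ((PySem.List.pyRange 0 (grid.length : Int) 1).map (fun _ =>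
        List.replicate ((PySem.List.pyGetD grid 0 ([] : List Int)).length : Int).toNat
          (none : Option String))) ∧
    ∀ k j, k < grid.length → j < (PySem.List.pyGetD grid 0 ([] : List Int)).length →
      pvCell none ((PySem.List.pyRange 0 (grid.length : Int) 1).map (fun _ =>
        List.replicate ((PySem.List.pyGetD grid 0 ([] : List Int)).length : Int).toNat
          (none : Option String))) k j = none := by
  have hdims : pvDims grid.length (PySem.List.pyGetD grid 0 ([] : List Int)).length
      ((PySem.List.pyRange 0 (grid.length : Int) 1).map (fun _ =>
        List.replicate ((PySem.List.pyGetD grid 0 ([] : List Int)).length : Int).toNat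
          (none : Option String))) := by
    refine ⟨by simp [PySem.List.length_pyRange_one], ?_⟩
    intro row hmem
    obtain ⟨i, _, hrow⟩ := List.mem_map.mp hmem
    rw [← hrow]; simp
  refine ⟨hdims, ?_⟩
  intro k j hk hj
  rw [pvCell_eq none _ _ _ hdims k j hk, List.getElem_map]
  simp [List.getD_eq_getElem?_getD, hj]

-- B's countdown over range(last, -1, -1) IS the reverse of enumerate(path)
theorem pvRevRange (path : List (Int × Int)) {α : Type}
    (g : List (List α) → (Int × Int × Int) → List (List α)) (init : List (List α)) :
    (PySem.List.pyRange ((path.length : Int) - 1) (-1) (-1)).foldl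
        (fun viz i => g viz (i, PySem.List.pyGetD path i (0, 0))) init
      = (PySem.List.enumerate path 0).reverse.foldl g init := by
  rw [PySem.List.pyRange_neg_one_eq_reverse]
  have h1 : ((-1 : Int) + 1) = 0 := by norm_num
  have h2 : ((path.length : Int) - 1 + 1) = (path.length : Int) := by ring
  rw [h1, h2]
  rw [PySem.List.enumerate_eq_map_pyRange (d := ((0 : Int), (0 : Int))), ← List.map_reverse,
      List.foldl_map]
  rfl

-- the whole equivalence, for an abstract labelling function
theorem pvMain (grid : List (List Int)) (path : List (Int × Int)) (lab : Int → String)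
    (hg : grid ≠ [])
    (hb : ∀ p ∈ path,
        -(grid.length : Int) ≤ p.1 ∧ p.1 < (grid.length : Int) ∧
        -((PySem.List.pyGetD grid 0 ([] : List Int)).length : Int) ≤ p.2 ∧
        p.2 < ((PySem.List.pyGetD grid 0 ([] : List Int)).length : Int))
    (hp : path ≠ []) :
    ((PySem.List.enumerate path 0).foldl (fun viz p =>
        PySem.List.pySetD viz p.2.1
          (PySem.List.pySetD (PySem.List.pyGetD viz p.2.1 []) p.2.2 (lab p.1)))
      ((PySem.List.pyRange 0 (grid.length : Int) 1).map (fun i =>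
        (PySem.List.pyRange 0 ((PySem.List.pyGetD grid 0 ([] : List Int)).length : Int) 1).map (fun j =>
          if PySem.List.pyGetD (PySem.List.pyGetD grid i []) j 0 = 0 then "." else "#")))).map
        (fun row => PySem.Str.join "" row)
    = (PySem.List.enumerate
        ((PySem.List.pyRange ((path.length : Int) - 1) (-1) (-1)).foldl (fun viz i =>
          if PySem.List.pyGetD (PySem.List.pyGetD viz (PySem.List.pyGetD path i (0, 0)).1 [])
              (PySem.List.pyGetD path i (0, 0)).2 none = none then
            PySem.List.pySetD viz (PySem.List.pyGetD path i (0, 0)).1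
              (PySem.List.pySetD
                (PySem.List.pyGetD viz (PySem.List.pyGetD path i (0, 0)).1 [])
                (PySem.List.pyGetD path i (0, 0)).2 (some (lab i)))
          else viz)
        ((PySem.List.pyRange 0 (grid.length : Int) 1).map (fun _ =>
          List.replicate ((PySem.List.pyGetD grid 0 ([] : List Int)).length : Int).toNat
            (none : Option String)))) 0).map (fun q =>
      PySem.Str.join "" ((PySem.List.enumerate q.2 0).map (fun c =>
        c.2.getD (if PySem.List.pyGetD (PySem.List.pyGetD grid q.1 []) c.1 0 = 0 then "." else "#")))) := by
  set n := grid.length with hn_def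
  set m := (PySem.List.pyGetD grid 0 ([] : List Int)).length with hm_def
  obtain ⟨p0, hp0⟩ := List.exists_mem_of_ne_nil path hp
  have hb0 := hb p0 hp0
  have hn : 0 < n := by
    rcases grid with _ | _
    · exact absurd rfl hg
    · simp [hn_def]
  have hm : 0 < m := by omega
  have hbok : ∀ p ∈ PySem.List.enumerate path 0, pvOk n m p.2.1 p.2.2 := by
    intro p hpmem
    have hmem : p.2 ∈ path := by
      have := PySem.List.map_snd_enumerate path (0 : Int)
      rw [← this]
      exact List.mem_map_of_mem hpmem
    have := hb p.2 hmem
    exact ⟨this.1, this.2.1, this.2.2.1, this.2.2.2⟩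
  have hbokr : ∀ p ∈ (PySem.List.enumerate path 0).reverse, pvOk n m p.2.1 p.2.2 := by
    intro p hpmem; exact hbok p (List.mem_reverse.mp hpmem)
  rw [pvRevRange path (fun viz p =>
    if PySem.List.pyGetD (PySem.List.pyGetD viz p.2.1 []) p.2.2 none = none then
      PySem.List.pySetD viz p.2.1
        (PySem.List.pySetD (PySem.List.pyGetD viz p.2.1 []) p.2.2 (some (lab p.1)))
    else viz)]
  obtain ⟨hAbd, hAbc⟩ := pvBaseA grid
  obtain ⟨hBbd, hBbc⟩ := pvBaseB grid
  set vizA := (PySem.List.enumerate path 0).foldl (fun viz p =>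
      PySem.List.pySetD viz p.2.1
        (PySem.List.pySetD (PySem.List.pyGetD viz p.2.1 []) p.2.2 (lab p.1)))
    ((PySem.List.pyRange 0 (n : Int) 1).map (fun i =>
      (PySem.List.pyRange 0 (m : Int) 1).map (fun j =>
        if PySem.List.pyGetD (PySem.List.pyGetD grid i []) j 0 = 0 then "." else "#")))
    with hvizA
  set vizB := (PySem.List.enumerate path 0).reverse.foldl (fun viz p =>
      if PySem.List.pyGetD (PySem.List.pyGetD viz p.2.1 []) p.2.2 none = none then
        PySem.List.pySetD viz p.2.1
          (PySem.List.pySetD (PySem.List.pyGetD viz p.2.1 []) p.2.2 (some (lab p.1)))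
      else viz)
    ((PySem.List.pyRange 0 (n : Int) 1).map (fun _ =>
      List.replicate ((m : Nat) : Int).toNat (none : Option String)))
    with hvizB
  obtain ⟨hAd, hAc⟩ := pvFoldA n m lab (PySem.List.enumerate path 0) _ hAbd hbok hn
  obtain ⟨hBd, hBc⟩ := pvFoldB n m lab (PySem.List.enumerate path 0).reverse _ hBbd hbokr hn hm
  rw [← hvizA] at hAd hAc
  rw [← hvizB] at hBd hBc
  rw [PySem.List.enumerate_eq_map_pyRange (d := ([] : List (Option String))), List.map_map]
  have hlenB : (vizB.length : Int) = (n : Int) := by rw [hBd.1]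
  apply List.ext_getElem
  · simp [hAd.1, hBd.1, PySem.List.length_pyRange_one]
  · intro k hk1 hk2
    have hk : k < n := by
      rw [List.length_map, hAd.1] at hk1; exact hk1
    rw [List.getElem_map, List.getElem_map, PySem.List.getElem_pyRange_one]
    simp only [Function.comp_apply, zero_add]
    apply congrArg (PySem.Str.join "")
    have hrowB : PySem.List.pyGetD vizB ((k : Int)) ([] : List (Option String)) = vizB.getD k [] :=
      PySem.List.pyGetD_natCast ..
    have hrowBlen : (vizB.getD k ([] : List (Option String))).length = m := by
      rw [List.getD_eq_getElem _ _ (by rw [hBd.1]; omega)]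
      exact hBd.2 _ (List.getElem_mem _)
    rw [PySem.List.enumerate_eq_map_pyRange (d := (none : Option String)), List.map_map,
        hrowB, PySem.List.len_eq, hrowBlen]
    have hrowAlen : (vizA[k]'(by rw [hAd.1]; omega)).length = m :=
      hAd.2 _ (List.getElem_mem _)
    apply List.ext_getElem
    · simp [hrowAlen, PySem.List.length_pyRange_one]
    · intro jn hj1 hj2
      have hjn : jn < m := by rw [hrowAlen] at hj1; exact hj1
      rw [List.getElem_map, PySem.List.getElem_pyRange_one]
      simp only [Function.comp_apply, zero_add]
      have eA : pvCell "" vizA k jn = (vizA[k]'(by rw [hAd.1]; omega))[jn]'(by rw [hrowAlen]; omega) := by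
        rw [pvCell_eq "" n m vizA hAd k jn hk,
            List.getD_eq_getElem _ "" (n := jn) (by rw [hrowAlen]; omega)]
      have eB : PySem.List.pyGetD (vizB.getD k ([] : List (Option String))) ((jn : Int)) (none : Option String)
          = pvCell none vizB k jn := by
        rw [PySem.List.pyGetD_natCast]; rfl
      rw [← eA, eB, hAc k jn hk hjn, hBc k jn hk hjn, hBbc k jn hk hjn]
      cases hfind : (PySem.List.enumerate path 0).reverse.find? (pvHit n m k jn) with
      | some p => simp
      | none => simp [hAbc k jn hk hjn]

-- ===== VERDICT (by name: the statement is the Claim_ definition above) =====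
theorem create_visualization_py_spec : Claim_equal_create_visualization_py := by
  intro grid path _ hpre
  unfold Spec_create_visualization_py
  by_cases hp : path = []
  · simp [create_visualization_py, create_visualization_py_alt, hp]
  · obtain ⟨hg, hshort, hb⟩ := hpre.resolve_left hp
    simp only [create_visualization_py, create_visualization_py_alt, if_neg hp]
    exact pvMain grid path
      (fun i => if i = 0 then "S" else if i = (path.length : Int) - 1 then "E"
                else PySem.Int.toStr (PySem.Int.mod i 10))
      hg (by intro p hp'; have := hb p hp'; rw [← pvHead_eq] at this; exact this) hp
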